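-- pv_equiv track=rewrite | github.com/sua1223/Algorithm | Programmers/Lv.1/strangeString.py | solution
-- ===== SOURCE A (Python) =====
-- def solution(s):
--     answer=''
--     a=s.split(" ")
--     for i in range (0, len(a)):
--         for j in range (0, len(a[i])):
--             k = a[i][j]
--             if j%2==0:
--                 k=k.upper()
--                 answer=answer+k
--             else:
--                 k=k.lower()
--                 answer=answer+k
--         answer=answer+' '
--     answer=answer.rstrip()
--     return answer
-- ===== SOURCE B (Python) =====
-- def solution(s):
--     out = []
--     j = 0
--     for c in s:
--         if c == ' ':
--             out.append(' ')
--             j = 0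
--         else:
--             out.append(c.upper() if j % 2 == 0 else c.lower())
--             j += 1
--     return ''.join(out).rstrip()
-- ===== Notes on version B (the rewrite author's own statement) =====
-- stated objective: simpler
-- what changed: Replaced split-into-words plus nested index loops with a single left-to-right character scan that keeps a position counter reset at each space, then one rstrip.
import Mathlib
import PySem

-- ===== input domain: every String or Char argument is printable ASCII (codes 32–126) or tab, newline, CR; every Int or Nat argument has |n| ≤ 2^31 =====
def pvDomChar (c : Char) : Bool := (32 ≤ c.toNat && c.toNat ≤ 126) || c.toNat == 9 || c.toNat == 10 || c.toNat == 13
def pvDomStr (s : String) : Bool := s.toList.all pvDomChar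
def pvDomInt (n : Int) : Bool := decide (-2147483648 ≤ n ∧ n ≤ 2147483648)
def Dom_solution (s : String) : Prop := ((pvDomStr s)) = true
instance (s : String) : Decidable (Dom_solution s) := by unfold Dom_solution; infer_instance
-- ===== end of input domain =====

-- B replaces A's split-into-words + nested index loops by a single left-to-right
-- character scan with a position counter reset at each space (objective: simpler).

-- ===== PORT A =====
-- A: split on " ", for each word upper/lower chars by even/odd position,
-- append a space after every word, rstrip at the end.
def solution (s : String) : String :=
  let a : List (List Char) := (PySem.Chars.split? s.toList [' ']).getD []
  let answer : List Char :=
    a.foldl (fun answer w =>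
      (w.zipIdx.foldl (fun answer kj =>
        if kj.2 % 2 == 0 then answer ++ [PySem.Chars.upperChar kj.1]
        else answer ++ [PySem.Chars.lowerChar kj.1]) answer) ++ [' ']) []
  String.ofList (PySem.Chars.rstrip answer)

-- ===== PORT B =====
-- B: one scan; on ' ' emit ' ' and reset the counter, otherwise emit the
-- cased char and bump the counter; rstrip the result.
def solution_alt (s : String) : String :=
  let st :=
    s.toList.foldl (fun (st : List Char × Nat) c =>
      if c = ' ' then (st.1 ++ [' '], 0)
      else (st.1 ++ [if st.2 % 2 == 0 then PySem.Chars.upperChar c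
                     else PySem.Chars.lowerChar c], st.2 + 1)) ([], 0)
  String.ofList (PySem.Chars.rstrip st.1)

-- ===== PRECONDITION & SPEC =====
def Spec_solution (s : String) (out : String) : Prop := out = solution_alt s
instance (s : String) (out : String) : Decidable (Spec_solution s out) := by unfold Spec_solution; infer_instance

-- ===== CLAIM (what is proved, stated in full; the proofs are below) =====
def Claim_equal_solution : Prop := ∀ (s : String), Dom_solution s → Spec_solution s (solution s)

-- ===== LEMMAS AND PROOFS =====

-- simple recursive single-char split (first-match semantics of str.split(" "))
def mySplit : List Char → List (List Char)
  | [] => [[]]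
  | c :: r =>
    if c = ' ' then [] :: mySplit r
    else match mySplit r with
      | w :: ws => (c :: w) :: ws
      | [] => [[c]]

def transJ (j : Nat) : List Char → List Char
  | [] => []
  | c :: r =>
    (if j % 2 == 0 then PySem.Chars.upperChar c else PySem.Chars.lowerChar c) :: transJ (j + 1) r

-- joined transformed words with trailing spaces, first word started at index j
def G (j : Nat) : List (List Char) → List Char
  | [] => []
  | w :: ws => transJ j w ++ [' '] ++ G 0 ws

def B0 (j : Nat) : List Char → List Char
  | [] => []
  | c :: r =>
    if c = ' ' then ' ' :: B0 0 r
    else (if j % 2 == 0 then PySem.Chars.upperChar c else PySem.Chars.lowerChar c) :: B0 (j + 1) r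

theorem mySplit_ne_nil (cs : List Char) : mySplit cs ≠ [] := by
  cases cs with
  | nil => simp [mySplit]
  | cons c r =>
    simp only [mySplit]
    split
    · simp
    · cases h : mySplit r <;> simp

theorem splitOn_go_eq (fuel : Nat) :
    ∀ (l cur : List Char) (acc : List (List Char)), l.length < fuel →
      PySem.Chars.splitOn.go [' '] fuel l cur acc =
        acc.reverse ++ (match mySplit l with
          | w :: ws => (cur.reverse ++ w) :: ws
          | [] => [cur.reverse]) := by
  induction fuel with
  | zero => intro l cur acc h; omega
  | succ fuel ih =>
    intro l cur acc h
    cases l with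
    | nil => simp [PySem.Chars.splitOn.go, mySplit]
    | cons c rest =>
      simp only [PySem.Chars.splitOn.go]
      by_cases hc : c = ' '
      · subst hc
        rw [if_pos (by simp [List.isPrefixOf])]
        simp only [List.length_cons] at h
        simp only [List.length_singleton, List.drop_succ_cons, List.drop_zero]
        rw [ih rest [] (cur.reverse :: acc) (by omega)]
        simp only [mySplit]
        cases hms : mySplit rest with
        | nil => exact absurd hms (mySplit_ne_nil rest)
        | cons w ws => simp
      · rw [if_neg (by simp [List.isPrefixOf]; intro h'; exact hc h'.symm)]
        simp only [List.length_cons] at h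
        rw [ih rest (c :: cur) acc (by omega)]
        simp only [mySplit, if_neg hc]
        cases hms : mySplit rest with
        | nil => exact absurd hms (mySplit_ne_nil rest)
        | cons w ws => simp

theorem splitOn_eq (cs : List Char) : PySem.Chars.splitOn cs [' '] = mySplit cs := by
  show PySem.Chars.splitOn.go [' '] (cs.length + 1) cs [] [] = mySplit cs
  rw [splitOn_go_eq (cs.length + 1) cs [] [] (by omega)]
  cases hms : mySplit cs with
  | nil => exact absurd hms (mySplit_ne_nil cs)
  | cons w ws => simp

-- A's inner fold over an enumerated word produces transJ
theorem inner_fold_eq (w : List Char) : ∀ (j : Nat) (ans : List Char),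
    (w.zipIdx j).foldl (fun answer kj =>
        if kj.2 % 2 == 0 then answer ++ [PySem.Chars.upperChar kj.1]
        else answer ++ [PySem.Chars.lowerChar kj.1]) ans = ans ++ transJ j w := by
  induction w with
  | nil => intro j ans; simp [transJ]
  | cons c r ih =>
    intro j ans
    simp only [List.zipIdx_cons, List.foldl_cons, ih, transJ]
    split <;> simp

theorem foldl_emit (g : List Char → List Char) (ws : List (List Char)) :
    ∀ (ans : List Char), ws.foldl (fun a w => a ++ g w) ans = ans ++ (ws.map g).flatten := by
  induction ws with
  | nil => intro ans; simp
  | cons w ws ih => intro ans; simp [ih]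

theorem G0_flatten (ws : List (List Char)) :
    G 0 ws = (ws.map (fun w => transJ 0 w ++ [' '])).flatten := by
  induction ws with
  | nil => simp [G]
  | cons w ws ih => simp [G, ih]

-- A's outer fold over the word list produces G 0
theorem outer_fold_eq (ws : List (List Char)) : ∀ (ans : List Char),
    ws.foldl (fun answer w =>
      (w.zipIdx.foldl (fun answer kj =>
        if kj.2 % 2 == 0 then answer ++ [PySem.Chars.upperChar kj.1]
        else answer ++ [PySem.Chars.lowerChar kj.1]) answer) ++ [' ']) ans
      = ans ++ G 0 ws := by
  intro ans
  simp only [inner_fold_eq, List.append_assoc, foldl_emit, G0_flatten]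

-- the joined transformed split equals B's scan (plus the trailing space)
theorem G_mySplit (cs : List Char) : ∀ (j : Nat), G j (mySplit cs) = B0 j cs ++ [' '] := by
  induction cs with
  | nil => intro j; simp [mySplit, G, transJ, B0]
  | cons c r ih =>
    intro j
    by_cases hc : c = ' '
    · subst hc
      simp [mySplit, G, transJ, B0, ih 0]
    · simp only [mySplit, if_neg hc]
      cases hms : mySplit r with
      | nil => exact absurd hms (mySplit_ne_nil r)
      | cons w ws =>
        have h2 : G (j + 1) (mySplit r) = B0 (j + 1) r ++ [' '] := ih (j + 1)
        rw [hms] at h2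
        simp only [G, B0, if_neg hc, transJ, List.cons_append] at h2 ⊢
        rw [h2]

-- B's fold with an accumulator
theorem b_fold_eq (cs : List Char) : ∀ (out : List Char) (j : Nat),
    (cs.foldl (fun (st : List Char × Nat) c =>
      if c = ' ' then (st.1 ++ [' '], 0)
      else (st.1 ++ [if st.2 % 2 == 0 then PySem.Chars.upperChar c
                     else PySem.Chars.lowerChar c], st.2 + 1)) (out, j)).1
      = out ++ B0 j cs := by
  induction cs with
  | nil => intro out j; simp [B0]
  | cons c r ih =>
    intro out j
    by_cases hc : c = ' '
    · subst hc; simp only [List.foldl_cons, ih, B0]; simp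
    · simp only [List.foldl_cons, ih, B0, if_neg hc]; simp

theorem rstrip_append_space (x : List Char) :
    PySem.Chars.rstrip (x ++ [' ']) = PySem.Chars.rstrip x := by
  simp [PySem.Chars.rstrip, PySem.Chars.isspace]

-- ===== VERDICT (by name: the statement is the Claim_ definition above) =====
theorem solution_spec : Claim_equal_solution := by
  intro s _
  unfold Spec_solution
  have h : (PySem.Chars.split? s.toList [' ']).getD [] = mySplit s.toList := by
    simp [PySem.Chars.split?, splitOn_eq]
  simp only [solution, solution_alt, h, outer_fold_eq, b_fold_eq, List.nil_append]
  rw [G_mySplit, rstrip_append_space]
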